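-- pv_equiv track=rewrite | github.com/harjassand/RHSEA | nhsea_phase0/nhsea/generators.py | _append_edges
-- ===== SOURCE A (Python) =====
-- from typing import Dict, Iterable, List, Sequence, Tuple
--
-- PAD_TOKEN = "PAD"
--
-- EDGE_TOKEN = "E"
--
-- def _append_edges(tokens: List[str], edges: Sequence[Tuple[int, int]], T: int) -> List[str]:
--     out = list(tokens)
--     for a, b in edges:
--         if len(out) + 3 > T:
--             break
--         out.extend([EDGE_TOKEN, f"P{a:02d}", f"P{b:02d}"])
--     if len(out) > T:
--         out = out[:T]
--     if len(out) < T: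
--         out.extend([PAD_TOKEN] * (T - len(out)))
--     return out
-- ===== SOURCE B (Python) =====
-- PAD_TOKEN = "PAD"
-- EDGE_TOKEN = "E"
--
-- def _append_edges(tokens, edges, T):
--     # Positional construction: compute each of the T output slots directly by index.
--     L = len(tokens)
--     k = min(len(edges), max(0, (T - L) // 3))
--
--     def tok(i):
--         if i < L:
--             return tokens[i]
--         j, r = divmod(i - L, 3)
--         if j >= k:
--             return PAD_TOKEN
--         if r == 0:
--             return EDGE_TOKEN
--         return f"P{edges[j][r - 1]:02d}"
--
--     return [tok(i) for i in range(T)]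
-- ===== Notes on version B (the rewrite author's own statement) =====
-- stated objective: alternative
-- what changed: B builds the length-T output positionally: one map over range(T) where each index is decoded arithmetically into a token slot (original token / edge-triple component via divmod / PAD), instead of A's sequential append-with-break followed by truncate-and-pad.
-- intended difference: For negative T with len(tokens) > -T, A's out[:T] slice keeps the first len(tokens)+T tokens (an accident of Python negative slicing), while B returns the empty list, the intended result of fitting a sequence to a non-positive target length T. — e.g. on _append_edges(["x", "y"], [], -1): A returns ["x"], B returns []
import Mathlib
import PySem

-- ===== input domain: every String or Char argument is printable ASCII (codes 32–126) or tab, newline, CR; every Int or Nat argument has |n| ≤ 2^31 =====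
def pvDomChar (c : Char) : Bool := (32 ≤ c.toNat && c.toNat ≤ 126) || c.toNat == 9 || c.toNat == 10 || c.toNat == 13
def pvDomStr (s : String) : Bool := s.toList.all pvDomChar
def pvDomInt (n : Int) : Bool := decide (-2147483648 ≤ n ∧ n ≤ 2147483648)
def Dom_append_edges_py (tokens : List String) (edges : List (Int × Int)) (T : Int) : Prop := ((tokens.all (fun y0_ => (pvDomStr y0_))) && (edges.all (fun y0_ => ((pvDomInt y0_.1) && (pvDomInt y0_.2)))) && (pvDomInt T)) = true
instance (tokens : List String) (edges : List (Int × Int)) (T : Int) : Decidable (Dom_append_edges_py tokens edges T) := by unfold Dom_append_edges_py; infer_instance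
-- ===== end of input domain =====

-- B builds the length-T output positionally (one map over the T output indices, decoding each
-- index arithmetically into token / edge-triple component / PAD) instead of A's sequential
-- append-with-break followed by truncate-and-pad. Objective: alternative; same cost.

-- f"P{a:02d}": zero-pad a nonnegative single digit to width 2 (exact for all ints:
-- a negative or multi-digit int already has width ≥ 2, so it is printed as str(a)).
def fmtP (a : Int) : String := "P" ++ (if 0 ≤ a ∧ a < 10 then "0" ++ PySem.Int.toStr a else PySem.Int.toStr a)

-- ===== PORT A =====
-- the for-loop of A: extend `out` per edge, break as soon as len(out) + 3 > T
def aLoop (T : Int) : List (Int × Int) → List String → List String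
  | [], out => out
  | (a, b) :: rest, out =>
    if (out.length : Int) + 3 > T then out
    else aLoop T rest (out ++ ["E", fmtP a, fmtP b])

def append_edges_py (tokens : List String) (edges : List (Int × Int)) (T : Int) : List String :=
  let out := aLoop T edges tokens
  let out1 := if (out.length : Int) > T then PySem.List.slice out none (some T) else out
  if (out1.length : Int) < T then out1 ++ List.replicate (T - (out1.length : Int)).toNat "PAD" else out1

-- ===== PORT B =====
-- tok(i) of Source B: tokens[i] / edges[j] indexing is in range whenever B calls it (i < L, j < k ≤ len edges),
-- so getD with a junk default is exact here.
def tokAt (tokens : List String) (edges : List (Int × Int)) (k : Nat) (i : Nat) : String :=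
  if i < tokens.length then tokens.getD i ""
  else
    let j := (i - tokens.length) / 3
    let r := (i - tokens.length) % 3
    if k ≤ j then "PAD"
    else if r = 0 then "E"
    else if r = 1 then fmtP (edges.getD j (0, 0)).1
    else fmtP (edges.getD j (0, 0)).2

def append_edges_py_alt (tokens : List String) (edges : List (Int × Int)) (T : Int) : List String :=
  let L : Int := tokens.length
  let k : Nat := (min (edges.length : Int) (max 0 (PySem.Int.floordiv (T - L) 3))).toNat
  (List.range T.toNat).map (tokAt tokens edges k)

-- ===== PRECONDITION & SPEC =====
-- For negative T with len(tokens) > -T, A's out[:T] keeps the first len(tokens)+T tokens (an accident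
-- of Python negative slicing); B returns [], the intended result of fitting to a non-positive length T.
def D_append_edges_py (tokens : List String) (edges : List (Int × Int)) (T : Int) : Prop :=
  T < 0 ∧ (tokens.length : Int) + T > 0
instance (tokens : List String) (edges : List (Int × Int)) (T : Int) : Decidable (D_append_edges_py tokens edges T) := by unfold D_append_edges_py; infer_instance

def Spec_append_edges_py (tokens : List String) (edges : List (Int × Int)) (T : Int) (out : List String) : Prop := ¬ D_append_edges_py tokens edges T → out = append_edges_py_alt tokens edges T
instance (tokens : List String) (edges : List (Int × Int)) (T : Int) (out : List String) : Decidable (Spec_append_edges_py tokens edges T out) := by unfold Spec_append_edges_py; infer_instance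

def pvDiffWitness_append_edges_py : List String × (List (Int × Int)) × Int := (["x", "y"], [], -1)
def pvDiffWitnessOut_append_edges_py : (List String) × (List String) := (["x"], [])

-- ===== CLAIM (what is proved, stated in full; the proofs are below) =====
def Claim_unchanged_append_edges_py : Prop := ∀ (tokens : List String) (edges : List (Int × Int)) (T : Int), Dom_append_edges_py tokens edges T → Spec_append_edges_py tokens edges T (append_edges_py tokens edges T)
def Claim_changed_append_edges_py : Prop := Dom_append_edges_py (pvDiffWitness_append_edges_py.1) (pvDiffWitness_append_edges_py.2.1) (pvDiffWitness_append_edges_py.2.2) ∧ D_append_edges_py (pvDiffWitness_append_edges_py.1) (pvDiffWitness_append_edges_py.2.1) (pvDiffWitness_append_edges_py.2.2) ∧ append_edges_py (pvDiffWitness_append_edges_py.1) (pvDiffWitness_append_edges_py.2.1) (pvDiffWitness_append_edges_py.2.2) = pvDiffWitnessOut_append_edges_py.1 ∧ append_edges_py_alt (pvDiffWitness_append_edges_py.1) (pvDiffWitness_append_edges_py.2.1) (pvDiffWitness_append_edges_py.2.2) = pvDiffWitnessOut_append_edges_py.2 ∧ pvDiffWitnessOut_append_edges_py.1 ≠ 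pvDiffWitnessOut_append_edges_py.2
def Claim_exact_append_edges_py : Prop := ∀ (tokens : List String) (edges : List (Int × Int)) (T : Int), Dom_append_edges_py tokens edges T → D_append_edges_py tokens edges T → append_edges_py tokens edges T ≠ append_edges_py_alt tokens edges T

-- ===== LEMMAS AND PROOFS =====

def edgeFlat (l : List (Int × Int)) : List String :=
  l.flatMap (fun p => ["E", fmtP p.1, fmtP p.2])

theorem edgeFlat_length (l : List (Int × Int)) : (edgeFlat l).length = 3 * l.length := by
  induction l with
  | nil => simp [edgeFlat]
  | cons p rest ih => simp [edgeFlat] at ih ⊢; omega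

-- A's loop equals "take the k edges that fit, flatten"
theorem aLoop_eq (T : Int) (edges : List (Int × Int)) : ∀ (out : List String),
    aLoop T edges out = out ++ edgeFlat (edges.take (min (edges.length : Int) (max 0 (PySem.Int.floordiv (T - (out.length : Int)) 3))).toNat) := by
  induction edges with
  | nil => intro out; simp [aLoop, edgeFlat]
  | cons e rest ih =>
    intro out
    obtain ⟨a, b⟩ := e
    rw [PySem.Int.floordiv_eq_ediv_of_pos (by omega : (0:Int) < 3)]
    by_cases h : (out.length : Int) + 3 > T
    · have hk : (min ((((a, b) :: rest).length : Nat) : Int) (max 0 ((T - (out.length : Int)) / 3))).toNat = 0 := by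
        simp only [List.length_cons]; omega
      simp only [aLoop, if_pos h, hk, List.take_zero, edgeFlat, List.flatMap_nil, List.append_nil]
    · have hstep := ih (out ++ ["E", fmtP a, fmtP b])
      rw [PySem.Int.floordiv_eq_ediv_of_pos (by omega : (0:Int) < 3)] at hstep
      have hlen : ((out ++ ["E", fmtP a, fmtP b]).length : Int) = (out.length : Int) + 3 := by simp
      rw [hlen] at hstep
      have hk : (min ((((a, b) :: rest).length : Nat) : Int) (max 0 ((T - (out.length : Int)) / 3))).toNat
          = (min ((rest.length : Nat) : Int) (max 0 ((T - ((out.length : Int) + 3)) / 3))).toNat + 1 := by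
        simp only [List.length_cons]; omega
      simp only [aLoop, if_neg h]
      rw [hstep, hk, List.take_succ_cons]
      simp [edgeFlat]

-- indexing the flattened triples
theorem edgeFlat_getElem? (l : List (Int × Int)) : ∀ (m : Nat), m < 3 * l.length →
    (edgeFlat l)[m]? = some (if m % 3 = 0 then "E" else if m % 3 = 1 then fmtP (l.getD (m / 3) (0, 0)).1 else fmtP (l.getD (m / 3) (0, 0)).2) := by
  induction l with
  | nil => intro m hm; simp at hm
  | cons p rest ih =>
    intro m hm
    have hflat : edgeFlat (p :: rest) = "E" :: fmtP p.1 :: fmtP p.2 :: edgeFlat rest := by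
      simp [edgeFlat]
    rw [hflat]
    match m with
    | 0 => simp
    | 1 => simp
    | 2 => simp
    | (n + 3) =>
      have hn : n < 3 * rest.length := by simp at hm; omega
      have := ih n hn
      have h1 : (n + 3) % 3 = n % 3 := by omega
      have h2 : (n + 3) / 3 = n / 3 + 1 := by omega
      simp [h1, h2, this]

theorem getD_take_of_lt {α : Type} (l : List α) (n i : Nat) (d : α) (h : i < n) :
    (l.take n).getD i d = l.getD i d := by
  simp [List.getD, List.getElem?_take_of_lt h]

theorem fd3 (a : Int) : PySem.Int.floordiv a 3 = a / 3 :=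
  PySem.Int.floordiv_eq_ediv_of_pos (by omega)

theorem build_eq (tokens : List String) (edges : List (Int × Int)) (k c : Nat)
    (hkle : k ≤ edges.length) (hfit : tokens.length + 3 * k ≤ c) :
    tokens ++ edgeFlat (edges.take k) ++ List.replicate (c - (tokens.length + 3 * k)) "PAD" =
      List.map (tokAt tokens edges k) (List.range c) := by
  have hflatlen : (edgeFlat (edges.take k)).length = 3 * k := by
    rw [edgeFlat_length, List.length_take]; omega
  apply List.ext_getElem
  · simp only [List.length_append, List.length_replicate, List.length_map, List.length_range, hflatlen]
    omega
  · intro i hi1 hi2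
    simp only [List.length_map, List.length_range] at hi2
    rw [List.getElem_map, List.getElem_range]
    simp only [List.append_assoc]
    by_cases hiL : i < tokens.length
    · rw [List.getElem_append_left hiL]
      simp only [tokAt, if_pos hiL]
      exact (List.getD_eq_getElem tokens "" hiL).symm
    · rw [List.getElem_append_right (by omega : tokens.length ≤ i)]
      simp only [tokAt, if_neg hiL]
      by_cases hik : i - tokens.length < 3 * k
      · -- inside the edge triples
        have hjk : ¬ (k ≤ (i - tokens.length) / 3) := by omega
        rw [List.getElem_append_left (by rw [hflatlen]; omega)]
        have hsome := edgeFlat_getElem? (edges.take k) (i - tokens.length)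
          (by rw [List.length_take]; omega)
        have hget : (edgeFlat (edges.take k))[i - tokens.length]'(by rw [hflatlen]; omega) =
            (if (i - tokens.length) % 3 = 0 then "E"
             else if (i - tokens.length) % 3 = 1 then
               fmtP ((edges.take k).getD ((i - tokens.length) / 3) (0, 0)).1
             else fmtP ((edges.take k).getD ((i - tokens.length) / 3) (0, 0)).2) := by
          rw [List.getElem?_eq_getElem (by rw [hflatlen]; omega)] at hsome
          exact Option.some_injective _ hsome
        rw [hget, getD_take_of_lt _ _ _ _ (by omega : (i - tokens.length) / 3 < k)]
        rw [if_neg hjk]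
      · -- padding region
        have hjk : k ≤ (i - tokens.length) / 3 := by omega
        rw [List.getElem_append_right (by rw [hflatlen]; omega)]
        rw [List.getElem_replicate, if_pos hjk]

theorem main_eq (tokens : List String) (edges : List (Int × Int)) (T : Int)
    (hD : ¬ D_append_edges_py tokens edges T) :
    append_edges_py tokens edges T = append_edges_py_alt tokens edges T := by
  simp only [append_edges_py, append_edges_py_alt]
  rw [aLoop_eq]
  simp only [fd3]
  set k : Nat := (min (edges.length : Int) (max 0 ((T - ((tokens.length : Nat) : Int)) / 3))).toNat with hk
  have hkle : k ≤ edges.length := by omega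
  have hflatlen : (edgeFlat (edges.take k)).length = 3 * k := by
    rw [edgeFlat_length, List.length_take]; omega
  have houtlen : (tokens ++ edgeFlat (edges.take k)).length = tokens.length + 3 * k := by
    simp [hflatlen]
  by_cases hT : 0 ≤ T
  · obtain ⟨c, rfl⟩ : ∃ c : Nat, T = (c : Int) := ⟨T.toNat, by omega⟩
    by_cases hLT : tokens.length ≤ c
    · -- no truncation: tokens.length + 3k ≤ c, pad up to c
      have hfit : tokens.length + 3 * k ≤ c := by omega
      split_ifs with h1 h2
      · exfalso; omega
      · exfalso; omega
      · -- pad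
        have hcnt : ((c : Int) - ((tokens ++ edgeFlat (edges.take k)).length : Int)).toNat
            = c - (tokens.length + 3 * k) := by omega
        rw [hcnt, Int.toNat_natCast]
        exact build_eq tokens edges k c hkle hfit
      · -- length is exactly c
        have h0 : c - (tokens.length + 3 * k) = 0 := by omega
        have := build_eq tokens edges k c hkle hfit
        rw [h0] at this
        simpa [Int.toNat_natCast] using this
    · -- tokens.length > c: k = 0, truncate tokens to c
      have hk0 : k = 0 := by omega
      rw [hk0]
      simp only [List.take_zero, edgeFlat, List.flatMap_nil, List.append_nil]
      split_ifs with h1 h2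
      · exfalso
        rw [PySem.List.slice_to_natCast] at h2
        simp only [List.length_take] at h2
        omega
      · rw [PySem.List.slice_to_natCast, Int.toNat_natCast]
        apply List.ext_getElem
        · simp only [List.length_take, List.length_map, List.length_range]
          omega
        · intro i hi1 hi2
          simp only [List.length_map, List.length_range] at hi2
          rw [List.getElem_map, List.getElem_range, List.getElem_take]
          have hiL : i < tokens.length := by omega
          simp only [tokAt, if_pos hiL]
          exact (List.getD_eq_getElem tokens "" hiL).symm
      · exfalso; omega
      · exfalso; omega
  · -- T < 0; ¬D gives tokens.length + T ≤ 0, both sides are []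
    have hLT0 : (tokens.length : Int) + T ≤ 0 := by
      by_contra hc
      exact hD ⟨by omega, by omega⟩
    have hk0 : k = 0 := by omega
    rw [hk0]
    simp only [List.take_zero, edgeFlat, List.flatMap_nil, List.append_nil]
    obtain ⟨c, rfl⟩ : ∃ c : Nat, T = -(c : Int) := ⟨(-T).toNat, by omega⟩
    split_ifs with h1 h2
    · exfalso; omega
    · rw [PySem.List.slice_to_neg_natCast tokens c (by omega)]
      have htz : tokens.length - c = 0 := by omega
      have hTz : (-(c : Int)).toNat = 0 := by omega
      rw [htz, List.take_zero, hTz]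
      simp
    · exfalso; omega
    · exfalso; omega

-- ===== VERDICT (by name: the statement is the Claim_ definition above) =====
theorem append_edges_py_spec : Claim_unchanged_append_edges_py := by
  intro tokens edges T _ hD
  exact main_eq tokens edges T hD

theorem append_edges_py_changed : Claim_changed_append_edges_py := by
  unfold Claim_changed_append_edges_py; decide

theorem append_edges_py_tight : Claim_exact_append_edges_py := by
  intro tokens edges T _ hD
  obtain ⟨hT, hLT⟩ := hD
  intro heq
  have hlenB : (append_edges_py_alt tokens edges T).length = 0 := by
    simp only [append_edges_py_alt]
    simp [Int.toNat_of_nonpos (by omega : T ≤ 0)]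
  have hlenA : 0 < (append_edges_py tokens edges T).length := by
    simp only [append_edges_py]
    rw [aLoop_eq]
    simp only [fd3]
    have hk0 : (min (edges.length : Int) (max 0 ((T - ((tokens.length : Nat) : Int)) / 3))).toNat = 0 := by
      omega
    rw [hk0]
    simp only [List.take_zero, edgeFlat, List.flatMap_nil, List.append_nil]
    obtain ⟨c, rfl⟩ : ∃ c : Nat, T = -(c : Int) := ⟨(-T).toNat, by omega⟩
    split_ifs with h1 h2
    · exfalso; omega
    · rw [PySem.List.slice_to_neg_natCast tokens c (by omega)]
      simp only [List.length_take]
      omega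
    · exfalso; omega
    · exfalso; omega
  rw [heq, hlenB] at hlenA
  exact absurd hlenA (by omega)
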